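-- pv_equiv track=rewrite | github.com/MzamoTembe/bioinformatics_toolkit | bio_seq.py | proteins_from_amino_acid_seq
-- ===== SOURCE A (Python) =====
-- def proteins_from_amino_acid_seq(amino_acid_seq: str) -> list[str]:
--     """Converts a sequence of amino acids into a list of proteins. A protein is defined as a string of at least 3 amino acids."""
--     current_proteins = []
--     proteins = []
--
--     for a in amino_acid_seq:
--         if a == "_":
--             for p in current_proteins:
--                 proteins.append(p)
--             current_proteins = []
--         else:
--             if a == "M":
--                 current_proteins.append("")
--             for i in range(len(current_proteins)):
--                 current_proteins[i] += a
--
--     return proteins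
-- ===== SOURCE B (Python) =====
-- def proteins_from_amino_acid_seq(amino_acid_seq: str) -> list[str]:
--     proteins = []
--     starts = []
--     for i, a in enumerate(amino_acid_seq):
--         if a == "_":
--             for j in starts:
--                 proteins.append(amino_acid_seq[j:i])
--             starts = []
--         elif a == "M":
--             starts.append(i)
--     return proteins
-- ===== Notes on version B (the rewrite author's own statement) =====
-- stated objective: faster
-- what changed: Instead of maintaining and extending every in-progress protein string character by character, B records only the indices of 'M' starts in one pass and emits seq[start:stop] slices when a '_' is reached.
import Mathlib
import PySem

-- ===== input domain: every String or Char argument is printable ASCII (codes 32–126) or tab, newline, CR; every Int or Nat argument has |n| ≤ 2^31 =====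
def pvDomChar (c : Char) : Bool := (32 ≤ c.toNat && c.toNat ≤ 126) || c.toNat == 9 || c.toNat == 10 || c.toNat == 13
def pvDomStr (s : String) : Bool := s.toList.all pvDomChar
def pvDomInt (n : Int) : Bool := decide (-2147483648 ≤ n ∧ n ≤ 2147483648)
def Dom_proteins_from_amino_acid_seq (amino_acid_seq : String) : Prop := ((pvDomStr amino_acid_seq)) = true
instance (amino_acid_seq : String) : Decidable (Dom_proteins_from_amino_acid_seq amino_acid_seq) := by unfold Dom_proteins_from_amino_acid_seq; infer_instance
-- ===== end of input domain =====

-- B replaces A's per-character extension of every open protein by recording the 'M' start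
-- indices in one pass and emitting seq[start:stop] slices at each '_' (objective: faster).

-- ===== PORT A =====
-- one loop iteration of A: on '_' flush current proteins, else open a new one on 'M' and extend all
def pvA_step (st : List String × List String) (a : Char) : List String × List String :=
  if a = '_' then ([], st.2 ++ st.1)
  else
    let cur := if a = 'M' then st.1 ++ [""] else st.1
    (cur.map (fun p => p.push a), st.2)

def proteins_from_amino_acid_seq (amino_acid_seq : String) : List String :=
  (amino_acid_seq.toList.foldl pvA_step ([], [])).2

-- ===== PORT B =====
-- B's loop over enumerate(s): i the current index, starts the recorded 'M' indices; s[j:i] via PySem slice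
def pvB_go (full : List Char) : List Char → Nat → List Nat → List String → List String
  | [], _, _, proteins => proteins
  | a :: rest, i, starts, proteins =>
    if a = '_' then
      pvB_go full rest (i + 1) []
        (proteins ++ starts.map (fun j =>
          String.ofList (PySem.List.slice full (some ((j : Nat) : Int)) (some ((i : Nat) : Int)))))
    else if a = 'M' then
      pvB_go full rest (i + 1) (starts ++ [i]) proteins
    else
      pvB_go full rest (i + 1) starts proteins

def proteins_from_amino_acid_seq_alt (amino_acid_seq : String) : List String :=
  pvB_go amino_acid_seq.toList amino_acid_seq.toList 0 [] []

-- ===== PRECONDITION & SPEC =====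
def Spec_proteins_from_amino_acid_seq (amino_acid_seq : String) (out : List String) : Prop := out = proteins_from_amino_acid_seq_alt amino_acid_seq
instance (amino_acid_seq : String) (out : List String) : Decidable (Spec_proteins_from_amino_acid_seq amino_acid_seq out) := by unfold Spec_proteins_from_amino_acid_seq; infer_instance

-- ===== CLAIM (what is proved, stated in full; the proofs are below) =====
def Claim_equal_proteins_from_amino_acid_seq : Prop := ∀ (amino_acid_seq : String), Dom_proteins_from_amino_acid_seq amino_acid_seq → Spec_proteins_from_amino_acid_seq amino_acid_seq (proteins_from_amino_acid_seq amino_acid_seq)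

-- ===== LEMMAS AND PROOFS =====

-- the string A keeps for a protein opened at index j, after processing the first k characters
def pvSeg (full : List Char) (k j : Nat) : String :=
  String.ofList ((full.drop j).take (k - j))

lemma pv_push_ofList (l : List Char) (a : Char) :
    (String.ofList l).push a = String.ofList (l ++ [a]) := by
  apply String.toList_inj.mp; simp

lemma pv_take_succ (full : List Char) (j k : Nat) (a : Char) (rest : List Char)
    (hj : j ≤ k) (h : full.drop k = a :: rest) :
    (full.drop j).take (k + 1 - j) = (full.drop j).take (k - j) ++ [a] := by
  have hdd : (full.drop j).drop (k - j) = a :: rest := by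
    rw [List.drop_drop, show j + (k - j) = k by omega, h]
  rw [show k + 1 - j = (k - j) + 1 by omega, List.take_add, hdd]
  simp

lemma pv_push_seg (full : List Char) (j k : Nat) (a : Char) (rest : List Char)
    (hj : j ≤ k) (h : full.drop k = a :: rest) :
    (pvSeg full k j).push a = pvSeg full (k + 1) j := by
  rw [pvSeg, pvSeg, pv_push_ofList, pv_take_succ full j k a rest hj h]

lemma pv_seg_self (full : List Char) (k : Nat) : pvSeg full k k = "" := by
  simp [pvSeg]

lemma pv_slice_eq_seg (full : List Char) (k j : Nat) :
    String.ofList (PySem.List.slice full (some ((j : Nat) : Int)) (some ((k : Nat) : Int)))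
      = pvSeg full k j := by
  rw [PySem.List.slice_natCast, pvSeg]

lemma pv_go_eq (full : List Char) :
    ∀ (rest : List Char) (k : Nat) (starts : List Nat) (pro : List String),
    full.drop k = rest →
    (∀ j ∈ starts, j ≤ k) →
    (rest.foldl pvA_step (starts.map (pvSeg full k), pro)).2
      = pvB_go full rest k starts pro := by
  intro rest
  induction rest with
  | nil => intro k starts pro _ _; simp [pvB_go]
  | cons a rest ih =>
    intro k starts pro h hle
    have h' : full.drop (k + 1) = rest := by
      have : (full.drop k).drop 1 = full.drop (k + 1) := by rw [List.drop_drop]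
      rw [← this, h]; rfl
    by_cases ha : a = '_'
    · subst ha
      rw [List.foldl_cons, pvB_go]
      simp only [pvA_step, reduceIte]
      have e : starts.map (fun j =>
          String.ofList (PySem.List.slice full (some ((j : Nat) : Int)) (some ((k : Nat) : Int))))
            = starts.map (pvSeg full k) :=
        List.map_congr_left fun j _ => pv_slice_eq_seg full k j
      rw [e, ← ih (k + 1) [] (pro ++ starts.map (pvSeg full k)) h' (by simp)]
      simp
    · -- non-'_' step: the new open-protein list is S'.map (pvSeg full (k+1))
      have key : ∀ S' : List Nat, (∀ j ∈ S', j ≤ k) →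
          (S'.map (pvSeg full k)).map (fun p => p.push a) = S'.map (pvSeg full (k + 1)) := by
        intro S' hS'
        rw [List.map_map]
        exact List.map_congr_left fun j hj => pv_push_seg full j k a rest (hS' j hj) h
      rw [List.foldl_cons, pvB_go]
      by_cases hM : a = 'M'
      · subst hM
        simp only [pvA_step, reduceIte]
        have e1 : (starts.map (pvSeg full k) ++ [""]) = (starts ++ [k]).map (pvSeg full k) := by
          rw [List.map_append]; simp [pv_seg_self]
        have hle' : ∀ j ∈ starts ++ [k], j ≤ k := by
          intro j hj; rcases List.mem_append.mp hj with hj | hj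
          · exact hle j hj
          · simp at hj; omega
        rw [e1, key _ hle']
        exact ih (k + 1) (starts ++ [k]) pro h' (fun j hj => by have := hle' j hj; omega)
      · simp only [pvA_step, if_neg ha, if_neg hM]
        rw [key starts hle]
        exact ih (k + 1) starts pro h' (fun j hj => by have := hle j hj; omega)

-- ===== VERDICT (by name: the statement is the Claim_ definition above) =====
theorem proteins_from_amino_acid_seq_spec : Claim_equal_proteins_from_amino_acid_seq := by
  intro s _
  show _ = _
  rw [proteins_from_amino_acid_seq, proteins_from_amino_acid_seq_alt,
    ← pv_go_eq s.toList s.toList 0 [] [] (by simp) (by simp)]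
  rfl
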